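-- pv_equiv track=rewrite | github.com/mattebeltra01/Project_Eulero | PB_1_100/pb18 - Maximum Path Sum I.py | create_pyramid
-- ===== SOURCE A (Python) =====
-- def create_pyramid(val):
--     pyramid = []
--     i = 0
--     row = 1 #lenght row
--
--     while i < len(val):
--         pyramid.append(val[i:i+row])
--         i += row
--         row += 1 # the lenght row increase by one each time to create the pyramid
--     return pyramid
-- ===== SOURCE B (Python) =====
-- def create_pyramid(val):
--     pyramid = []
--     buf = []
--     target = 1
--     for x in val:
--         buf.append(x)
--         if len(buf) == target:
--             pyramid.append(buf)
--             buf = []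
--             target += 1
--     if buf:
--         pyramid.append(buf)
--     return pyramid
-- ===== Notes on version B (the rewrite author's own statement) =====
-- stated objective: alternative
-- what changed: Replaces index-jump slicing (i, row, val[i:i+row]) by a single per-element pass that accumulates a current-row buffer, emits it when it reaches the target length, and flushes the trailing partial row.
import Mathlib
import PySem

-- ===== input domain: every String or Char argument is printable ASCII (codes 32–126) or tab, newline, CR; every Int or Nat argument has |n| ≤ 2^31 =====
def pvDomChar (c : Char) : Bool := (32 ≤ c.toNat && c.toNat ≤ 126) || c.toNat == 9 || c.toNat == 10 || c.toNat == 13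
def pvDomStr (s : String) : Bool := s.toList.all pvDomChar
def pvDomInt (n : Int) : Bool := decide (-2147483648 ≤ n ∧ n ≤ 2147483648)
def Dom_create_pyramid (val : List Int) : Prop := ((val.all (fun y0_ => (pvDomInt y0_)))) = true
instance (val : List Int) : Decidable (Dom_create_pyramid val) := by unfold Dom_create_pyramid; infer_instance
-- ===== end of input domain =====

-- B replaces A's index-jump slicing loop by a single per-element pass with a row buffer
-- and a fullness check (objective: alternative decomposition; same O(n) cost).

-- ===== PORT A =====
-- A's while loop; the parameter r encodes Python's `row` as r = row - 1 (so r + 1 = row),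
-- which gives the termination argument i < i + (r+1) directly; every step appends
-- val[i:i+row] exactly as A does (PySem.List.slice).
def pyramidLoopA (val : List Int) (i r : Nat) (acc : List (List Int)) : List (List Int) :=
  if _h : i < val.length then
    pyramidLoopA val (i + (r + 1)) (r + 1)
      (acc ++ [PySem.List.slice val (some (i : Int)) (some ((i : Int) + ((r + 1 : Nat) : Int)))])
  else acc
termination_by val.length - i

def create_pyramid (val : List Int) : List (List Int) :=
  pyramidLoopA val 0 0 []

-- ===== PORT B =====
-- B's for loop: state = (current-row buffer, target length, output); flushes the
-- trailing non-empty buffer when the input is exhausted.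
def pyramidLoopB (rest buf : List Int) (target : Nat) (acc : List (List Int)) : List (List Int) :=
  match rest with
  | [] => if buf = [] then acc else acc ++ [buf]
  | x :: xs =>
      let buf' := buf ++ [x]
      if buf'.length = target then pyramidLoopB xs [] (target + 1) (acc ++ [buf'])
      else pyramidLoopB xs buf' target acc

def create_pyramid_alt (val : List Int) : List (List Int) :=
  pyramidLoopB val [] 1 []

-- ===== PRECONDITION & SPEC =====
def Spec_create_pyramid (val : List Int) (out : List (List Int)) : Prop := out = create_pyramid_alt val
instance (val : List Int) (out : List (List Int)) : Decidable (Spec_create_pyramid val out) := by unfold Spec_create_pyramid; infer_instance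

-- ===== CLAIM (what is proved, stated in full; the proofs are below) =====
def Claim_equal_create_pyramid : Prop := ∀ (val : List Int), Dom_create_pyramid val → Spec_create_pyramid val (create_pyramid val)

-- ===== LEMMAS AND PROOFS =====

-- Common description of both loops: successive chunks of sizes r+1, r+2, …
def chunks (l : List Int) (r : Nat) : List (List Int) :=
  if h : l = [] then [] else l.take (r + 1) :: chunks (l.drop (r + 1)) (r + 1)
termination_by l.length
decreasing_by
  have : l.length ≠ 0 := by simpa using h
  simp [List.length_drop]; omega

theorem loopA_eq_chunks (val : List Int) (i r : Nat) (acc : List (List Int)) :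
    pyramidLoopA val i r acc = acc ++ chunks (val.drop i) r := by
  induction i, r, acc using pyramidLoopA.induct val with
  | case1 i r acc h ih =>
      rw [pyramidLoopA, dif_pos h, ih]
      have hne : val.drop i ≠ [] := by
        intro hc
        have := congrArg List.length hc
        simp at this; omega
      conv_rhs => rw [chunks]
      rw [dif_neg hne, PySem.List.slice_natCast_add]
      simp [List.drop_drop, List.append_assoc]
  | case2 i r acc h =>
      have : val.drop i = [] := by
        apply List.drop_eq_nil_of_le; omega
      rw [pyramidLoopA, dif_neg h, this, chunks]
      simp

theorem loopB_short (c : List Int) : ∀ (buf : List Int) (target : Nat) (acc : List (List Int)),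
    buf.length + c.length < target →
    pyramidLoopB c buf target acc = if buf ++ c = [] then acc else acc ++ [buf ++ c] := by
  induction c with
  | nil => intro buf target acc _; simp [pyramidLoopB]
  | cons x xs ih =>
      intro buf target acc h
      simp only [pyramidLoopB]
      rw [if_neg (by simp at h ⊢; omega)]
      rw [ih (buf ++ [x]) target acc (by simp at h ⊢; omega)]
      simp

theorem loopB_fill (c : List Int) : ∀ (buf : List Int) (target : Nat) (acc : List (List Int)) (rest : List Int),
    c ≠ [] → buf.length + c.length = target →
    pyramidLoopB (c ++ rest) buf target acc = pyramidLoopB rest [] (target + 1) (acc ++ [buf ++ c]) := by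
  induction c with
  | nil => intro _ _ _ _ hne _; exact absurd rfl hne
  | cons x xs ih =>
      intro buf target acc rest _ hlen
      cases xs with
      | nil =>
          rw [List.cons_append]
          simp only [pyramidLoopB]
          rw [if_pos (by simp at hlen ⊢; omega)]
          simp
      | cons y ys =>
          rw [List.cons_append]
          simp only [pyramidLoopB]
          rw [if_neg (by simp at hlen ⊢; omega)]
          rw [ih (buf ++ [x]) target acc rest (by simp) (by simp at hlen ⊢; omega)]
          simp

theorem loopB_eq_chunks (l : List Int) (r : Nat) : ∀ (acc : List (List Int)),
    pyramidLoopB l [] (r + 1) acc = acc ++ chunks l r := by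
  induction l, r using chunks.induct with
  | case1 r => intro acc; simp [pyramidLoopB, chunks]
  | case2 l r hne ih =>
      intro acc
      rw [chunks, dif_neg hne]
      by_cases hlt : l.length < r + 1
      · have hdrop : l.drop (r + 1) = [] := List.drop_eq_nil_of_le (by omega)
        have htake : l.take (r + 1) = l := List.take_of_length_le (by omega)
        rw [loopB_short l [] (r + 1) acc (by simpa using hlt)]
        rw [if_neg (by simpa using hne), hdrop, chunks, htake]
        simp
      · have hsplit : l.take (r + 1) ++ l.drop (r + 1) = l := List.take_append_drop _ _
        have htlen : (l.take (r + 1)).length = r + 1 := by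
          simp [List.length_take]; omega
        have htne : l.take (r + 1) ≠ [] := by
          intro hc; rw [hc] at htlen; simp at htlen
        calc pyramidLoopB l [] (r + 1) acc
            = pyramidLoopB (l.take (r + 1) ++ l.drop (r + 1)) [] (r + 1) acc := by rw [hsplit]
          _ = pyramidLoopB (l.drop (r + 1)) [] (r + 2) (acc ++ [[] ++ l.take (r + 1)]) :=
              loopB_fill _ _ _ _ _ htne (by simpa using htlen)
          _ = acc ++ (l.take (r + 1) :: chunks (l.drop (r + 1)) (r + 1)) := by
              rw [ih]; simp

-- ===== VERDICT (by name: the statement is the Claim_ definition above) =====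
theorem create_pyramid_spec : Claim_equal_create_pyramid := by
  intro val _
  unfold Spec_create_pyramid create_pyramid create_pyramid_alt
  rw [loopA_eq_chunks, loopB_eq_chunks]
  simp
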